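-- pv_equiv track=rewrite | github.com/Juantamayo26/Train | ICPC/ukiepc2020problems/balancedbreakdown/submissions/wrong_answer/mees.py | as_pal
-- ===== SOURCE A (Python) =====
-- def as_pal(N):
--     res = []
--     max_size = len(str(N))
--     while N:
--         if N < 10:
--             res.append(N)
--             break
--
--         exp = max(i for i in range(max_size) if 10**i < N)
--         pal = 0
--
--         for i in range((exp + 1)//2):
--             term = 10**(exp - i) + 10**i
--             pr = min(9, N // term)
--             pal += pr*term
--             N -= pr*term
--
--         if exp % 2 == 0:
--             term = 10**(exp//2)
--             pr = min(9, N // term)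
--             pal += pr*term
--             N -= pr*term
--
--         res.append(pal)
--     return res
-- ===== SOURCE B (Python) =====
-- def mirror(h, odd):
--     p = h
--     t = h // 10 if odd else h
--     while t:
--         p = p * 10 + t % 10
--         t //= 10
--     return p
--
-- def as_pal(N):
--     res = []
--     while N:
--         if N < 10:
--             res.append(N)
--             break
--         d = 0
--         t = N
--         while t:
--             d += 1
--             t //= 10
--         k = d // 2
--         h = N // 10 ** k
--         p = mirror(h, d % 2)
--         if p > N:
--             h -= 1
--             if h < 10 ** (d - k - 1):
--                 p = 10 ** (d - 1) - 1
--             else: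
--                 p = mirror(h, d % 2)
--         res.append(p)
--         N -= p
--     return res
-- ===== Notes on version B (the rewrite author's own statement) =====
-- stated objective: alternative
-- what changed: Each greedy step now computes the largest palindrome <= N directly by mirroring the integer first half (decrementing it once if the mirror overshoots, with an all-nines fallback), replacing A's inner loop that sums min(9, N//term)*term over symmetric digit-pair terms; digit count is obtained arithmetically instead of via str().
import Mathlib
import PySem

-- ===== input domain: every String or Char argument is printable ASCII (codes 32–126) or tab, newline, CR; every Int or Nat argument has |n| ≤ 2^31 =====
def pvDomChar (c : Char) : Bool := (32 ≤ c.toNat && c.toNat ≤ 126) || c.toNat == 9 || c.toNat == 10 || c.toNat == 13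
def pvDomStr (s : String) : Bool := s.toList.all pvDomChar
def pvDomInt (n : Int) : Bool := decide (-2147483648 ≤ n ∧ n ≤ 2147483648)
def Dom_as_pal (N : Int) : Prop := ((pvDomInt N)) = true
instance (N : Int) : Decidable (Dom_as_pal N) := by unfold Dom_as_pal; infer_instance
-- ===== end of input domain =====

-- B replaces A's inner digit-pair greedy loop by mirroring the integer first half of N
-- (decrement once on overshoot, all-nines fallback); same greedy outer loop, same results.
-- Both loops are totalised with fuel N.toNat + 1, ample for every terminating Python run.

-- ===== PORT A =====

-- inner 'for i in range((exp+1)//2)' loop of A; state (pal, N)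
def as_pal_inner (e : Int) : List Int → Int × Int → Int × Int
  | [], s => s
  | i :: is, (pal, N) =>
      let term : Int := 10 ^ (e - i).toNat + 10 ^ i.toNat
      let pr := min 9 (PySem.Int.floordiv N term)
      as_pal_inner e is (pal + pr * term, N - pr * term)

-- one iteration of A's 'while N:' body for N ≥ 10: (appended palindrome, new N)
def as_pal_step (maxSize N : Int) : Int × Int :=
  -- exp = max(i for i in range(max_size) if 10**i < N); the generator is never empty here
  let exp := (PySem.List.max?
    ((PySem.List.pyRange 0 maxSize 1).filter (fun i => decide ((10:Int) ^ i.toNat < N)))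
    (fun x => x)).getD 0
  let s := as_pal_inner exp (PySem.List.pyRange 0 (PySem.Int.floordiv (exp + 1) 2) 1) (0, N)
  if PySem.Int.mod exp 2 = 0 then
    let term : Int := 10 ^ (PySem.Int.floordiv exp 2).toNat
    let pr := min 9 (PySem.Int.floordiv s.2 term)
    (s.1 + pr * term, s.2 - pr * term)
  else s

-- 'while N:' loop of A (fuel-totalised)
def as_pal_loop (maxSize : Int) : Nat → Int → List Int → List Int
  | 0, _, res => res
  | fuel + 1, N, res =>
    if N = 0 then res
    else if N < 10 then res ++ [N]
    else
      let s := as_pal_step maxSize N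
      as_pal_loop maxSize fuel s.2 (res ++ [s.1])

def as_pal (N : Int) : List Int :=
  as_pal_loop (PySem.Str.len (PySem.Int.toStr N)) (N.toNat + 1) N []

-- ===== PORT B =====

-- 'while t: p = p*10 + t%10; t //= 10' of B's mirror (t stays ≥ 0 on every reachable call)
def mirror_go (p t : Int) : Int :=
  if h : 0 < t then mirror_go (p * 10 + PySem.Int.mod t 10) (PySem.Int.floordiv t 10) else p
termination_by t.toNat
decreasing_by
  rw [PySem.Int.floordiv_eq_ediv_of_pos (by omega : (0:Int) < 10)]; omega

def mirror (h odd : Int) : Int :=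
  mirror_go h (if odd ≠ 0 then PySem.Int.floordiv h 10 else h)

-- 'while t: d += 1; t //= 10' digit counter of B
def bdigits_go (d t : Int) : Int :=
  if h : 0 < t then bdigits_go (d + 1) (PySem.Int.floordiv t 10) else d
termination_by t.toNat
decreasing_by
  rw [PySem.Int.floordiv_eq_ediv_of_pos (by omega : (0:Int) < 10)]; omega

-- one iteration of B's 'while N:' body for N ≥ 10: the appended palindrome
def as_pal_alt_step (N : Int) : Int :=
  let d := bdigits_go 0 N
  let k := PySem.Int.floordiv d 2
  let h := PySem.Int.floordiv N (10 ^ k.toNat)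
  let p := mirror h (PySem.Int.mod d 2)
  if p > N then
    if h - 1 < 10 ^ (d - k - 1).toNat then (10:Int) ^ (d - 1).toNat - 1
    else mirror (h - 1) (PySem.Int.mod d 2)
  else p

-- 'while N:' loop of B (fuel-totalised)
def as_pal_alt_loop : Nat → Int → List Int → List Int
  | 0, _, res => res
  | fuel + 1, N, res =>
    if N = 0 then res
    else if N < 10 then res ++ [N]
    else
      let p := as_pal_alt_step N
      as_pal_alt_loop fuel (N - p) (res ++ [p])

def as_pal_alt (N : Int) : List Int :=
  as_pal_alt_loop (N.toNat + 1) N []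

-- ===== PRECONDITION & SPEC =====
def Spec_as_pal (N : Int) (out : List Int) : Prop := out = as_pal_alt N
instance (N : Int) (out : List Int) : Decidable (Spec_as_pal N out) := by unfold Spec_as_pal; infer_instance

-- ===== CLAIM (what is proved, stated in full; the proofs are below) =====
def Claim_equal_as_pal : Prop := ∀ (N : Int), Dom_as_pal N → Spec_as_pal N (as_pal N)

-- ===== LEMMAS AND PROOFS =====

-- reverse of the low m digits of t, as an m-digit block
def rev : Nat → Nat → Nat
  | 0, _ => 0
  | m + 1, t => t % 10 * 10 ^ m + rev m (t / 10)

-- the length-(2m+o) palindrome with first half h (m mirrored digits, o ∈ {0,1} middle digits)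
def pal (m o h : Nat) : Nat := h * 10 ^ m + rev m (h / 10 ^ o)

-- the largest h < 10^(m+o) with pal m o h ≤ M
def palF (m o M : Nat) : Nat :=
  let h0 := M / 10 ^ m
  if 10 ^ (m + o) ≤ h0 then 10 ^ (m + o) - 1
  else if pal m o h0 ≤ M then h0 else h0 - 1

-- Nat image of A's inner loop
def GP (e : Nat) : List Nat → Nat × Nat → Nat × Nat
  | [], s => s
  | i :: is, (p, n) =>
      let term := 10 ^ (e - i) + 10 ^ i
      let pr := min 9 (n / term)
      GP e is (p + pr * term, n - pr * term)

-- Nat image of one whole step of A (inner pairs + optional middle digit): the palindrome chosen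
def G (e M : Nat) : Nat :=
  let s := GP e (List.range ((e + 1) / 2)) (0, M)
  if e % 2 = 0 then s.1 + min 9 (s.2 / 10 ^ (e / 2)) * 10 ^ (e / 2) else s.1

theorem rev_lt (m t : Nat) : rev m t < 10 ^ m := by
  induction m generalizing t with
  | zero => simp only [rev, pow_zero]; omega
  | succ m ih =>
    have h1 := ih (t / 10)
    have h2 : t % 10 ≤ 9 := by omega
    have h3 : t % 10 * 10 ^ m ≤ 9 * 10 ^ m := Nat.mul_le_mul_right _ h2
    simp only [rev, pow_succ]
    linarith

theorem rev_split (m a u : Nat) (ha : a < 10) (hu : u < 10 ^ m) :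
    rev (m + 1) (a * 10 ^ m + u) = a + 10 * rev m u := by
  induction m generalizing u with
  | zero =>
    simp only [pow_zero, Nat.lt_one_iff] at hu
    subst hu
    simp [rev, Nat.mod_eq_of_lt ha]
  | succ m ih =>
    have hd10 : (10:Nat) ∣ a * 10 ^ (m + 1) := ⟨a * 10 ^ m, by ring⟩
    have hmod : (a * 10 ^ (m + 1) + u) % 10 = u % 10 := by
      obtain ⟨c, hc⟩ := hd10
      omega
    have hdiv : (a * 10 ^ (m + 1) + u) / 10 = a * 10 ^ m + u / 10 := by
      rw [show a * 10 ^ (m + 1) + u = u + a * 10 ^ m * 10 by ring]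
      rw [Nat.add_mul_div_right u (a * 10 ^ m) (by norm_num : (0:Nat) < 10)]
      omega
    have hu' : u / 10 < 10 ^ m := by
      rw [Nat.div_lt_iff_lt_mul (by norm_num)]
      calc u < 10 ^ (m + 1) := hu
      _ = 10 ^ m * 10 := by ring
    have hrevu : rev (m + 1) u = u % 10 * 10 ^ m + rev m (u / 10) := rfl
    show (a * 10 ^ (m + 1) + u) % 10 * 10 ^ (m + 1) + rev (m + 1) ((a * 10 ^ (m + 1) + u) / 10)
        = a + 10 * rev (m + 1) u
    rw [hmod, hdiv, ih (u / 10) hu', hrevu]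
    ring

theorem pal_ge (m o h : Nat) : h * 10 ^ m ≤ pal m o h := Nat.le_add_right _ _

theorem pal_lt (m o h : Nat) : pal m o h < (h + 1) * 10 ^ m := by
  have := rev_lt m (h / 10 ^ o)
  simp only [pal]
  nlinarith

theorem rev_zero (m : Nat) : rev m 0 = 0 := by
  induction m with
  | zero => rfl
  | succ m ih => simp [rev, ih]

theorem pal_zero (m o : Nat) : pal m o 0 = 0 := by
  simp [pal, rev_zero]

theorem rev_nines (m : Nat) : rev m (10 ^ m - 1) = 10 ^ m - 1 := by
  induction m with
  | zero => rfl
  | succ m ih =>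
    have hp : 1 ≤ 10 ^ m := Nat.one_le_pow _ _ (by norm_num)
    have hps : 10 ^ (m + 1) = 10 ^ m * 10 := by ring
    have hmod : (10 ^ (m + 1) - 1) % 10 = 9 := by omega
    have hdiv : (10 ^ (m + 1) - 1) / 10 = 10 ^ m - 1 := by omega
    show (10 ^ (m + 1) - 1) % 10 * 10 ^ m + rev m ((10 ^ (m + 1) - 1) / 10) = 10 ^ (m + 1) - 1
    rw [hmod, hdiv, ih]
    omega

theorem pal_nines (m o : Nat) (ho : o ≤ 1) : pal m o (10 ^ (m + o) - 1) = 10 ^ (2 * m + o) - 1 := by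
  have hp : 1 ≤ 10 ^ m := Nat.one_le_pow _ _ (by norm_num)
  have hdiv : (10 ^ (m + o) - 1) / 10 ^ o = 10 ^ m - 1 := by
    interval_cases o
    · simp
    · have : 10 ^ (m + 1) = 10 ^ m * 10 := by ring
      simp only [pow_one]
      omega
  rw [pal, hdiv, rev_nines]
  have h1 : (10 ^ (m + o)) * 10 ^ m = 10 ^ (2 * m + o) := by rw [← pow_add]; ring_nf
  have h4 : (10 ^ (m + o) - 1) * 10 ^ m = 10 ^ (2 * m + o) - 10 ^ m := by
    rw [Nat.sub_mul, h1, one_mul]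
  have hp3 : 10 ^ m ≤ 10 ^ (2 * m + o) := Nat.pow_le_pow_right (by norm_num) (by omega)
  omega

-- pal is strictly monotone in h
theorem pal_mono_strict (m o : Nat) {h1 h2 : Nat} (h : h1 < h2) : pal m o h1 < pal m o h2 := by
  calc pal m o h1 < (h1 + 1) * 10 ^ m := pal_lt m o h1
  _ ≤ h2 * 10 ^ m := Nat.mul_le_mul_right _ (by omega)
  _ ≤ pal m o h2 := pal_ge m o h2

theorem pal_mono (m o : Nat) {h1 h2 : Nat} (h : h1 ≤ h2) : pal m o h1 ≤ pal m o h2 := by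
  rcases Nat.eq_or_lt_of_le h with he | hl
  · rw [he]
  · exact le_of_lt (pal_mono_strict m o hl)

theorem palF_lt (m o M : Nat) : palF m o M < 10 ^ (m + o) := by
  have hp : 1 ≤ 10 ^ (m + o) := Nat.one_le_pow _ _ (by norm_num)
  simp only [palF]
  split_ifs with h1 h2
  · omega
  · omega
  · omega

theorem palF_pal_le (m o M : Nat) : pal m o (palF m o M) ≤ M := by
  have hBpos : 0 < (10:Nat) ^ m := pow_pos (by norm_num) _
  simp only [palF]
  split_ifs with h1 h2
  · have h2 : 10 ^ (m + o) * 10 ^ m ≤ M := by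
      calc 10 ^ (m + o) * 10 ^ m ≤ M / 10 ^ m * 10 ^ m := Nat.mul_le_mul_right _ h1
      _ ≤ M := Nat.div_mul_le_self M _
    have hp : 1 ≤ 10 ^ (m + o) := Nat.one_le_pow _ _ (by norm_num)
    refine le_of_lt ?_
    calc pal m o (10 ^ (m + o) - 1) < (10 ^ (m + o) - 1 + 1) * 10 ^ m := pal_lt _ _ _
    _ = 10 ^ (m + o) * 10 ^ m := by rw [Nat.sub_add_cancel hp]
    _ ≤ M := h2
  · exact h2
  · have h0pos : 0 < M / 10 ^ m := by
      rcases Nat.eq_zero_or_pos (M / 10 ^ m) with h0 | h0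
      · rw [h0, pal_zero] at h2; omega
      · exact h0
    refine le_of_lt ?_
    calc pal m o (M / 10 ^ m - 1) < (M / 10 ^ m - 1 + 1) * 10 ^ m := pal_lt _ _ _
    _ = M / 10 ^ m * 10 ^ m := by rw [Nat.sub_add_cancel h0pos]
    _ ≤ M := Nat.div_mul_le_self M _

theorem palF_char (m o M : Nat) {h : Nat} (hlt : h < 10 ^ (m + o)) :
    pal m o h ≤ M ↔ h ≤ palF m o M := by
  have hBpos : 0 < (10:Nat) ^ m := pow_pos (by norm_num) _
  constructor
  · intro hle
    by_contra hgt
    push_neg at hgt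
    simp only [palF] at hgt
    split_ifs at hgt with h1 h2
    · omega
    · -- h > h0 = M / 10^m, so pal h ≥ h * 10^m ≥ (h0+1) * 10^m > M
      have hub : M < 10 ^ m * (M / 10 ^ m + 1) := Nat.lt_mul_div_succ M hBpos
      have hge : (M / 10 ^ m + 1) * 10 ^ m ≤ h * 10 ^ m := Nat.mul_le_mul_right _ (by omega)
      have := pal_ge m o h
      nlinarith
    · push_neg at h2
      have : pal m o (M / 10 ^ m) ≤ pal m o h := pal_mono m o (by omega)
      omega
  · intro hle
    calc pal m o h ≤ pal m o (palF m o M) := pal_mono m o hle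
    _ ≤ M := palF_pal_le m o M

-- GP is additive in the pal accumulator and subtracts what it adds
theorem GP_shift (e : Nat) (l : List Nat) (p q n : Nat) :
    GP e l (p + q, n) = (p + (GP e l (q, n)).1, (GP e l (q, n)).2) := by
  induction l generalizing q n with
  | nil => simp [GP]
  | cons i is ih =>
    simp only [GP]
    rw [show p + q + min 9 (n / (10 ^ (e - i) + 10 ^ i)) * (10 ^ (e - i) + 10 ^ i)
        = p + (q + min 9 (n / (10 ^ (e - i) + 10 ^ i)) * (10 ^ (e - i) + 10 ^ i)) by ring]
    exact ih _ _

theorem GP_sub (e : Nat) (l : List Nat) (n : Nat) :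
    (GP e l (0, n)).1 ≤ n ∧ (GP e l (0, n)).2 = n - (GP e l (0, n)).1 := by
  induction l generalizing n with
  | nil => simp [GP]
  | cons i is ih =>
    simp only [GP, Nat.zero_add]
    set term := 10 ^ (e - i) + 10 ^ i with hterm
    set pr := min 9 (n / term) with hpr
    have hle : pr * term ≤ n :=
      le_trans (Nat.mul_le_mul_right _ (min_le_right _ _)) (Nat.div_mul_le_self _ _)
    have hrw : GP e is (pr * term, n - pr * term)
        = (pr * term + (GP e is (0, n - pr * term)).1, (GP e is (0, n - pr * term)).2) := by
      conv_lhs => rw [← Nat.add_zero (pr * term)]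
      exact GP_shift e is (pr * term) 0 _
    rw [hrw]
    obtain ⟨h1, h2⟩ := ih (n - pr * term)
    constructor <;> simp <;> omega

-- the scaling step: pairs i+1, …: everything is 10 × the (e)-problem on n/10
theorem GP_scale (e : Nat) (l : List Nat) (n : Nat) (hl : ∀ i ∈ l, i ≤ e) :
    GP (e + 2) (l.map (· + 1)) (0, n) =
      (10 * (GP e l (0, n / 10)).1, 10 * (GP e l (0, n / 10)).2 + n % 10) := by
  induction l generalizing n with
  | nil => simp [GP]; omega
  | cons i is ih =>
    have hie : i ≤ e := hl i List.mem_cons_self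
    simp only [List.map_cons, GP, Nat.zero_add]
    have hterm : 10 ^ (e + 2 - (i + 1)) + 10 ^ (i + 1) = 10 * (10 ^ (e - i) + 10 ^ i) := by
      rw [show e + 2 - (i + 1) = (e - i) + 1 by omega]
      ring
    rw [hterm]
    set t := 10 ^ (e - i) + 10 ^ i with ht
    have htpos : 0 < t := by positivity
    rw [Nat.div_div_eq_div_mul] at *
    rw [show n / (10 * t) = n / 10 / t by rw [Nat.div_div_eq_div_mul]]
    set pr := min 9 (n / 10 / t) with hpr
    have hle : pr * t ≤ n / 10 :=
      le_trans (Nat.mul_le_mul_right _ (min_le_right _ _)) (Nat.div_mul_le_self _ _)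
    have hmul : pr * (10 * t) = 10 * (pr * t) := by ring
    have hn := Nat.div_add_mod n 10
    have hsub : n - pr * (10 * t) = 10 * (n / 10 - pr * t) + n % 10 := by omega
    have hsubdiv : (n - pr * (10 * t)) / 10 = n / 10 - pr * t := by
      rw [hsub]
      have h0 : n % 10 / 10 = 0 := Nat.div_eq_of_lt (by omega)
      rw [Nat.mul_add_div (by norm_num), h0, Nat.add_zero]
    have hsubmod : (n - pr * (10 * t)) % 10 = n % 10 := by omega
    have hrw : GP (e + 2) (is.map (· + 1)) (pr * (10 * t), n - pr * (10 * t))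
        = (pr * (10 * t) + (GP (e + 2) (is.map (· + 1)) (0, n - pr * (10 * t))).1,
           (GP (e + 2) (is.map (· + 1)) (0, n - pr * (10 * t))).2) := by
      conv_lhs => rw [← Nat.add_zero (pr * (10 * t))]
      exact GP_shift _ _ _ 0 _
    rw [hrw, ih (n - pr * (10 * t)) (fun j hj => hl j (List.mem_cons_of_mem _ hj)),
      hsubdiv, hsubmod]
    have hrw2 : GP e is (pr * t, n / 10 - pr * t)
        = (pr * t + (GP e is (0, n / 10 - pr * t)).1, (GP e is (0, n / 10 - pr * t)).2) := by
      conv_lhs => rw [← Nat.add_zero (pr * t)]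
      exact GP_shift _ _ _ 0 _
    rw [hrw2]
    rw [Prod.ext_iff]
    constructor
    · simp only
      omega
    · simp only

-- peeled recursion for G
theorem G_peel (e M : Nat) :
    G (e + 2) M =
      (min 9 (M / (10 ^ (e + 2) + 1))) * (10 ^ (e + 2) + 1)
      + 10 * G e ((M - (min 9 (M / (10 ^ (e + 2) + 1))) * (10 ^ (e + 2) + 1)) / 10) := by
  set T := 10 ^ (e + 2) + 1 with hT
  set a := min 9 (M / T) with ha
  have haT : a * T ≤ M :=
    le_trans (Nat.mul_le_mul_right _ (min_le_right _ _)) (Nat.div_mul_le_self _ _)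
  have hm2 : (e + 2 + 1) / 2 = (e + 1) / 2 + 1 := by omega
  unfold G
  rw [hm2, List.range_succ_eq_map]
  simp only [GP, Nat.zero_add, Nat.sub_zero, pow_zero]
  have hrw : GP (e + 2) ((List.range ((e + 1) / 2)).map (· + 1)) (a * T, M - a * T)
      = (a * T + (GP (e + 2) ((List.range ((e + 1) / 2)).map (· + 1)) (0, M - a * T)).1,
         (GP (e + 2) ((List.range ((e + 1) / 2)).map (· + 1)) (0, M - a * T)).2) := by
    conv_lhs => rw [← Nat.add_zero (a * T)]
    exact GP_shift _ _ _ 0 _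
  rw [hrw]
  rw [GP_scale e (List.range ((e + 1) / 2)) (M - a * T)
    (fun i hi => by have := List.mem_range.mp hi; omega)]
  set Y := GP e (List.range ((e + 1) / 2)) (0, (M - a * T) / 10) with hY
  have hpar : (e + 2) % 2 = e % 2 := by omega
  rw [hpar]
  by_cases he : e % 2 = 0
  · rw [if_pos he, if_pos he]
    have hhalf : (e + 2) / 2 = e / 2 + 1 := by omega
    rw [hhalf]
    have hdd : (10 * Y.2 + (M - a * T) % 10) / 10 ^ (e / 2 + 1) = Y.2 / 10 ^ (e / 2) := by
      rw [pow_succ, Nat.mul_comm (10 ^ (e / 2)) 10, ← Nat.div_div_eq_div_mul]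
      have h1 : (10 * Y.2 + (M - a * T) % 10) / 10 = Y.2 := by omega
      rw [h1]
    rw [hdd]
    rw [pow_succ]
    ring
  · rw [if_neg he, if_neg he]

-- splitting off the leading digit of the half
theorem pal_split (m o a h' : Nat) (ha : a < 10) (hh : h' < 10 ^ (m + o)) :
    pal (m + 1) o (a * 10 ^ (m + o) + h') = a * (10 ^ (2 * m + o + 1) + 1) + 10 * pal m o h' := by
  have hop : 0 < (10:Nat) ^ o := pow_pos (by norm_num) _
  have hdiv : (a * 10 ^ (m + o) + h') / 10 ^ o = a * 10 ^ m + h' / 10 ^ o := by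
    rw [show a * 10 ^ (m + o) + h' = h' + a * 10 ^ m * 10 ^ o by rw [pow_add]; ring]
    rw [Nat.add_mul_div_right _ _ hop]
    ring
  have hlt : h' / 10 ^ o < 10 ^ m := by
    rw [Nat.div_lt_iff_lt_mul hop]
    calc h' < 10 ^ (m + o) := hh
    _ = 10 ^ m * 10 ^ o := pow_add 10 m o
  show (a * 10 ^ (m + o) + h') * 10 ^ (m + 1)
      + rev (m + 1) ((a * 10 ^ (m + o) + h') / 10 ^ o) = _
  rw [hdiv, rev_split m a (h' / 10 ^ o) ha hlt]
  show _ = a * (10 ^ (2 * m + o + 1) + 1) + 10 * (h' * 10 ^ m + rev m (h' / 10 ^ o))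
  have e1 : (a * 10 ^ (m + o) + h') * 10 ^ (m + 1)
      = a * (10 ^ (m + o) * 10 ^ (m + 1)) + 10 * (h' * 10 ^ m) := by
    rw [pow_succ]
    ring
  have e2 : (10:Nat) ^ (m + o) * 10 ^ (m + 1) = 10 ^ (2 * m + o + 1) := by
    rw [← pow_add]
    ring_nf
  rw [e1, e2]
  ring

-- the main theorem: A's greedy digit-pair fill produces the mirror of the largest valid half
theorem G_eq_pal : ∀ e M, M ≤ 10 ^ (e + 1) →
    G e M = pal ((e + 1) / 2) ((e + 1) % 2) (palF ((e + 1) / 2) ((e + 1) % 2) M)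
  | 0, M, hM => by
    norm_num at hM
    interval_cases M <;> decide
  | 1, M, hM => by
    norm_num at hM
    interval_cases M <;> decide
  | (e + 2), M, hM => by
    have hmo : 2 * ((e + 1) / 2) + (e + 1) % 2 = e + 1 := by omega
    set m := (e + 1) / 2 with hm
    set o := (e + 1) % 2 with ho
    have hoo : o ≤ 1 := by omega
    have hm3 : (e + 2 + 1) / 2 = m + 1 := by omega
    have hpar : (e + 2 + 1) % 2 = o := by omega
    rw [G_peel, hm3, hpar]
    set T := 10 ^ (e + 2) + 1 with hT
    set a := min 9 (M / T) with ha
    have hTpos : 0 < T := by positivity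
    have haT : a * T ≤ M :=
      le_trans (Nat.mul_le_mul_right _ (min_le_right _ _)) (Nat.div_mul_le_self _ _)
    set n' := (M - a * T) / 10 with hn'
    have hP3 : (10:Nat) ^ (e + 2 + 1) = 10 * 10 ^ (e + 2) := by rw [pow_succ]; ring
    have hP2 : (10:Nat) ^ (e + 2) = 10 * 10 ^ (e + 1) := by rw [pow_succ]; ring
    have hn'le : n' ≤ 10 ^ (e + 1) := by
      rcases le_or_gt (M / T) 9 with hc | hc
      · have haeq : a = M / T := by omega
        have hrem : M - a * T < T := by
          have h1 := Nat.div_add_mod M T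
          have h2 : M % T < T := Nat.mod_lt _ hTpos
          have h3 : a * T = T * (M / T) := by rw [haeq, Nat.mul_comm]
          omega
        rw [hn']
        omega
      · have haeq : a = 9 := by omega
        rw [hn', haeq, hT]
        omega
    have ih := G_eq_pal e n' hn'le
    set F' := palF m o n' with hF'
    have hF'lt : F' < 10 ^ (m + o) := palF_lt m o n'
    have hF'le : pal m o F' ≤ n' := palF_pal_le m o n'
    have halt : a < 10 := by omega
    have hsplit : ∀ h' : Nat, h' < 10 ^ (m + o) →
        pal (m + 1) o (a * 10 ^ (m + o) + h') = a * T + 10 * pal m o h' := by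
      intro h' hh'
      rw [pal_split m o a h' halt hh', hT]
      have : 2 * m + o + 1 = e + 2 := by omega
      rw [this]
    have hpow : (10:Nat) ^ (m + 1 + o) = 10 * 10 ^ (m + o) := by
      rw [show m + 1 + o = (m + o) + 1 by omega, pow_succ]
      ring
    have hclt : a * 10 ^ (m + o) + F' < 10 ^ (m + 1 + o) := by
      have : a * 10 ^ (m + o) ≤ 9 * 10 ^ (m + o) := Nat.mul_le_mul_right _ (by omega)
      omega
    have hc_le_M : pal (m + 1) o (a * 10 ^ (m + o) + F') ≤ M := by
      rw [hsplit F' hF'lt]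
      have h10 : 10 * n' ≤ M - a * T := by
        rw [hn']
        omega
      have := Nat.mul_le_mul_left 10 hF'le
      omega
    -- palF at the top level decomposes
    have hFeq : palF (m + 1) o M = a * 10 ^ (m + o) + F' := by
      have hF := palF_lt (m + 1) o M
      have hFle := palF_pal_le (m + 1) o M
      set F := palF (m + 1) o M with hFd
      have hle1 : a * 10 ^ (m + o) + F' ≤ F :=
        (palF_char (m + 1) o M hclt).mp hc_le_M
      have hle2 : F ≤ a * 10 ^ (m + o) + F' := by
        have hpos : 0 < (10:Nat) ^ (m + o) := pow_pos (by norm_num) _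
        set b := F / 10 ^ (m + o) with hb
        set h'' := F % 10 ^ (m + o) with hh''
        have hFsplit : F = b * 10 ^ (m + o) + h'' := by
          rw [hb, hh'', Nat.mul_comm]
          exact (Nat.div_add_mod F _).symm
        have hh''lt : h'' < 10 ^ (m + o) := Nat.mod_lt _ hpos
        have hblt : b < 10 := by
          rw [hb, Nat.div_lt_iff_lt_mul hpos]
          omega
        have hpalF : b * T + 10 * pal m o h'' ≤ M := by
          have := hsplit h'' hh''lt
          rw [hFsplit] at hFle
          rw [pal_split m o b h'' hblt hh''lt] at hFle
          have h2mo : 2 * m + o + 1 = e + 2 := by omega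
          rw [h2mo] at hFle
          omega
        have hba : b ≤ a := by
          by_contra hba
          push_neg at hba
          have ha9 : a < 9 := by omega
          have haMT : a = M / T := by omega
          have : b * T ≤ M := by omega
          have : b ≤ M / T := (Nat.le_div_iff_mul_le hTpos).mpr this
          omega
        rcases Nat.lt_or_ge b a with hba2 | hba2
        · have : F < (b + 1) * 10 ^ (m + o) := by
            rw [hFsplit, Nat.add_mul, one_mul]
            omega
          have : (b + 1) * 10 ^ (m + o) ≤ a * 10 ^ (m + o) := Nat.mul_le_mul_right _ (by omega)
          omega
        · have hbeq : b = a := by omega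
          rw [hbeq] at hpalF
          have hp' : pal m o h'' ≤ n' := by
            rw [hn']
            rw [Nat.le_div_iff_mul_le (by norm_num : (0:Nat) < 10)]
            omega
          have : h'' ≤ F' := by
            rw [hF']
            exact (palF_char m o n' hh''lt).mp hp'
          rw [hFsplit, hbeq]
          omega
      omega
    rw [hFeq, hsplit F' hF'lt, ih]

-- ---- Int/Nat cast helpers for the PySem primitives ----

theorem fdiv_cast (a b : Nat) : PySem.Int.floordiv (a : Int) (b : Int) = ((a / b : Nat) : Int) :=
  PySem.Int.floordiv_natCast a b

theorem fdiv10_cast (t : Nat) : PySem.Int.floordiv (t : Int) 10 = ((t / 10 : Nat) : Int) := by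
  exact_mod_cast fdiv_cast t 10

theorem mod10_cast (t : Nat) : PySem.Int.mod (t : Int) 10 = ((t % 10 : Nat) : Int) := by
  exact_mod_cast PySem.Int.mod_natCast t 10

theorem fdiv2_cast (t : Nat) : PySem.Int.floordiv (t : Int) 2 = ((t / 2 : Nat) : Int) := by
  exact_mod_cast fdiv_cast t 2

theorem mod2_cast (t : Nat) : PySem.Int.mod (t : Int) 2 = ((t % 2 : Nat) : Int) := by
  exact_mod_cast PySem.Int.mod_natCast t 2

theorem pow10_cast (k : Nat) : ((10 : Int)) ^ k = (((10 : Nat) ^ k : Nat) : Int) := by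
  push_cast
  ring

theorem pyRange_cast (m : Nat) :
    PySem.List.pyRange 0 (m : Int) 1 = (List.range m).map (fun k : Nat => (k : Int)) := by
  rw [PySem.List.pyRange_one]
  simp

-- ---- B's digit-count and mirror loops, characterised on Nat inputs ----

theorem bdigits_char : ∀ (m : Nat), 1 ≤ m → ∀ (t : Nat) (d : Int),
    10 ^ (m - 1) ≤ t → t < 10 ^ m → bdigits_go d (t : Int) = d + (m : Int)
  | 0, h, _, _, _, _ => by omega
  | 1, _, t, d, hlo, hhi => by
    norm_num at hlo hhi
    rw [bdigits_go, dif_pos (by exact_mod_cast hlo)]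
    rw [fdiv10_cast, show t / 10 = 0 by omega]
    rw [bdigits_go, dif_neg (by norm_num)]
    norm_num
  | (m + 2), _, t, d, hlo, hhi => by
    rw [show m + 2 - 1 = m + 1 from rfl] at hlo
    have hm : 1 ≤ m + 1 := by omega
    have hp : (10:Nat) ^ (m + 1) = 10 ^ m * 10 := pow_succ 10 m
    have hp2 : (10:Nat) ^ (m + 2) = 10 ^ (m + 1) * 10 := pow_succ 10 (m + 1)
    have h1 : 1 ≤ 10 ^ m := Nat.one_le_pow _ _ (by norm_num)
    have htpos : 0 < t := by omega
    rw [bdigits_go, dif_pos (by exact_mod_cast htpos), fdiv10_cast]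
    have hlo' : 10 ^ (m + 1 - 1) ≤ t / 10 := by
      rw [show m + 1 - 1 = m from rfl, Nat.le_div_iff_mul_le (by norm_num)]
      omega
    have hhi' : t / 10 < 10 ^ (m + 1) := by
      rw [Nat.div_lt_iff_lt_mul (by norm_num)]
      omega
    rw [bdigits_char (m + 1) hm (t / 10) (d + 1) hlo' hhi']
    push_cast
    ring

theorem mirror_go_char : ∀ (m : Nat), 1 ≤ m → ∀ (t p : Nat),
    10 ^ (m - 1) ≤ t → t < 10 ^ m →
    mirror_go (p : Int) (t : Int) = ((p * 10 ^ m + rev m t : Nat) : Int)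
  | 0, h, _, _, _, _ => by omega
  | 1, _, t, p, hlo, hhi => by
    norm_num at hlo hhi
    rw [mirror_go, dif_pos (by exact_mod_cast hlo), mod10_cast, fdiv10_cast]
    rw [show t / 10 = 0 by omega]
    rw [mirror_go, dif_neg (by norm_num)]
    push_cast [rev]
    omega
  | (m + 2), _, t, p, hlo, hhi => by
    rw [show m + 2 - 1 = m + 1 from rfl] at hlo
    have hm : 1 ≤ m + 1 := by omega
    have hp : (10:Nat) ^ (m + 1) = 10 ^ m * 10 := pow_succ 10 m
    have hp2 : (10:Nat) ^ (m + 2) = 10 ^ (m + 1) * 10 := pow_succ 10 (m + 1)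
    have h1 : 1 ≤ 10 ^ m := Nat.one_le_pow _ _ (by norm_num)
    have htpos : 0 < t := by omega
    rw [mirror_go, dif_pos (by exact_mod_cast htpos), mod10_cast, fdiv10_cast]
    have hlo' : 10 ^ (m + 1 - 1) ≤ t / 10 := by
      rw [show m + 1 - 1 = m from rfl, Nat.le_div_iff_mul_le (by norm_num)]
      omega
    have hhi' : t / 10 < 10 ^ (m + 1) := by
      rw [Nat.div_lt_iff_lt_mul (by norm_num)]
      omega
    have hrec : mirror_go ((p : Int) * 10 + ((t % 10 : Nat) : Int)) ((t / 10 : Nat) : Int)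
        = (((p * 10 + t % 10) * 10 ^ (m + 1) + rev (m + 1) (t / 10) : Nat) : Int) := by
      have := mirror_go_char (m + 1) hm (t / 10) (p * 10 + t % 10) hlo' hhi'
      rw [← this]
      norm_num
    rw [hrec]
    have hrev : rev (m + 2) t = t % 10 * 10 ^ (m + 1) + rev (m + 1) (t / 10) := rfl
    rw [hrev]
    push_cast
    ring

theorem mirror_zero (x : Int) : mirror x 0 = mirror_go x x := by
  unfold mirror
  norm_num

theorem mirror_one (x : Int) : mirror x 1 = mirror_go x (PySem.Int.floordiv x 10) := by
  unfold mirror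
  norm_num

-- mirror on a half with m mirrored digits and o ∈ {0,1} middle digits computes pal
theorem mirror_char (m o h : Nat) (hm : 1 ≤ m) (ho : o ≤ 1)
    (hlo : 10 ^ (m + o - 1) ≤ h) (hhi : h < 10 ^ (m + o)) :
    mirror (h : Int) (o : Int) = ((pal m o h : Nat) : Int) := by
  interval_cases o
  · simp only [Nat.cast_zero, mirror_zero]
    rw [mirror_go_char m hm h h (by simpa using hlo) (by simpa using hhi)]
    have : pal m 0 h = h * 10 ^ m + rev m h := by simp [pal]
    rw [this]
  · simp only [Nat.cast_one, mirror_one]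
    rw [fdiv10_cast]
    rw [show m + 1 - 1 = m from rfl] at hlo
    have hpm : 10 ^ (m - 1) * 10 = 10 ^ m := by
      rcases Nat.exists_eq_succ_of_ne_zero (by omega : m ≠ 0) with ⟨m', rfl⟩
      simp [pow_succ]
    have hlo' : 10 ^ (m - 1) ≤ h / 10 := by
      rw [Nat.le_div_iff_mul_le (by norm_num)]
      omega
    have hhi' : h / 10 < 10 ^ m := by
      rw [Nat.div_lt_iff_lt_mul (by norm_num)]
      calc h < 10 ^ (m + 1) := hhi
      _ = 10 ^ m * 10 := pow_succ 10 m
    rw [mirror_go_char m hm (h / 10) h hlo' hhi']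
    have : pal m 1 h = h * 10 ^ m + rev m (h / 10) := by simp [pal]
    rw [this]

-- rev of a power of ten: 1
theorem rev_pow (m : Nat) (hm : 1 ≤ m) : rev m (10 ^ (m - 1)) = 1 := by
  induction m with
  | zero => omega
  | succ m ih =>
    rcases Nat.eq_zero_or_pos m with h0 | h0
    · subst h0
      decide
    · have h1 : 1 ≤ 10 ^ m := Nat.one_le_pow _ _ (by norm_num)
      have hmod : 10 ^ (m + 1 - 1) % 10 = 0 := by
        simp only [Nat.add_sub_cancel]
        rcases Nat.exists_eq_succ_of_ne_zero (by omega : m ≠ 0) with ⟨m', rfl⟩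
        simp [pow_succ, Nat.mul_mod_left]
      have hdiv : 10 ^ (m + 1 - 1) / 10 = 10 ^ (m - 1) := by
        simp only [Nat.add_sub_cancel]
        rcases Nat.exists_eq_succ_of_ne_zero (by omega : m ≠ 0) with ⟨m', rfl⟩
        simp [pow_succ]
      show 10 ^ (m + 1 - 1) % 10 * 10 ^ m + rev m (10 ^ (m + 1 - 1) / 10) = 1
      rw [hmod, hdiv, ih h0]
      ring

-- pal at the smallest half: 10^e + 1
theorem pal_pow (m o : Nat) (hm : 1 ≤ m) (ho : o ≤ 1) :
    pal m o (10 ^ (m + o - 1)) = 10 ^ (2 * m + o - 1) + 1 := by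
  have hdiv : 10 ^ (m + o - 1) / 10 ^ o = 10 ^ (m - 1) := by
    interval_cases o
    · simp
    · have : m + 1 - 1 = (m - 1) + 1 := by omega
      rw [this, pow_succ, pow_one]
      exact Nat.mul_div_cancel _ (by norm_num)
  rw [pal, hdiv, rev_pow m hm]
  have : 10 ^ (m + o - 1) * 10 ^ m = 10 ^ (2 * m + o - 1) := by
    rw [← pow_add]
    congr 1
    omega
  rw [this]

-- ---- A's exp computation ----
theorem expA (ms : Int) (n e : Nat) (h1 : 10 ^ e < n) (h2 : n ≤ 10 ^ (e + 1)) (hms : (e : Int) < ms) :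
    (PySem.List.max?
      ((PySem.List.pyRange 0 ms 1).filter (fun i => decide ((10:Int) ^ i.toNat < (n : Int))))
      (fun x => x)).getD 0 = (e : Int) := by
  set L := (PySem.List.pyRange 0 ms 1).filter (fun i => decide ((10:Int) ^ i.toNat < (n : Int))) with hL
  have hmem : (e : Int) ∈ L := by
    rw [hL, List.mem_filter]
    constructor
    · rw [PySem.List.mem_pyRange_one]
      omega
    · simp only [decide_eq_true_eq, Int.toNat_natCast]
      rw [pow10_cast]
      exact_mod_cast h1
  have hub : ∀ x ∈ L, x ≤ (e : Int) := by
    intro x hx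
    rw [hL, List.mem_filter] at hx
    obtain ⟨hx1, hx2⟩ := hx
    rw [PySem.List.mem_pyRange_one] at hx1
    simp only [decide_eq_true_eq] at hx2
    rw [pow10_cast] at hx2
    have hxn : (10:Nat) ^ x.toNat < n := by exact_mod_cast hx2
    have : (10:Nat) ^ x.toNat < 10 ^ (e + 1) := by omega
    have := (Nat.pow_lt_pow_iff_right (by norm_num : 1 < 10)).mp this
    omega
  rcases hmax : PySem.List.max? L (fun x => x) with _ | m
  · rw [PySem.List.max?_eq_none_iff] at hmax
    rw [hmax] at hmem
    simp at hmem
  · have hmm : m ∈ L := PySem.List.max?_mem hmax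
    have hle1 : m ≤ (e : Int) := hub m hmm
    have hle2 : (e : Int) ≤ m := PySem.List.max?_isMax hmax _ hmem
    simp only [Option.getD_some]
    omega

-- ---- A's inner pair loop on casts of Nat state ----
theorem innerA (e' : Nat) : ∀ (l : List Nat) (p n : Nat), (∀ i ∈ l, i ≤ e') →
    as_pal_inner (e' : Int) (l.map (fun k : Nat => (k : Int))) ((p : Int), (n : Int))
      = (((GP e' l (p, n)).1 : Int), ((GP e' l (p, n)).2 : Int))
  | [], p, n, _ => rfl
  | i :: is, p, n, hl => by
    have hie : i ≤ e' := hl i List.mem_cons_self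
    simp only [List.map_cons, as_pal_inner, GP]
    have ht1 : ((e' : Int) - (i : Int)).toNat = e' - i := by omega
    have ht2 : ((i : Int)).toNat = i := by omega
    rw [ht1, ht2]
    have hterm : ((10:Int)) ^ (e' - i) + 10 ^ i = (((10 ^ (e' - i) + 10 ^ i : Nat)) : Int) := by
      push_cast
      ring
    rw [hterm, fdiv_cast]
    set T := 10 ^ (e' - i) + 10 ^ i with hT
    have hmin : min (9 : Int) ((n / T : Nat) : Int) = ((min 9 (n / T) : Nat) : Int) := by
      push_cast
      ring_nf
    rw [hmin]
    set pr := min 9 (n / T) with hpr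
    have hle : pr * T ≤ n :=
      le_trans (Nat.mul_le_mul_right _ (min_le_right _ _)) (Nat.div_mul_le_self _ _)
    have h1 : (p : Int) + ((pr : Nat) : Int) * ((T : Nat) : Int) = ((p + pr * T : Nat) : Int) := by
      push_cast
      ring
    have h2 : (n : Int) - ((pr : Nat) : Int) * ((T : Nat) : Int) = ((n - pr * T : Nat) : Int) := by
      push_cast [hle]
      ring
    rw [h1, h2]
    exact innerA e' is (p + pr * T) (n - pr * T) (fun j hj => hl j (List.mem_cons_of_mem _ hj))

-- ---- one whole step of B equals pal of palF ----
theorem stepB_eq (n e : Nat) (h10 : 10 ≤ n) (h1 : 10 ^ e < n) (h2 : n ≤ 10 ^ (e + 1)) :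
    as_pal_alt_step (n : Int)
    = ((pal ((e + 1) / 2) ((e + 1) % 2) (palF ((e + 1) / 2) ((e + 1) % 2) n) : Nat) : Int) := by
  unfold as_pal_alt_step
  set m := (e + 1) / 2 with hm
  set o := (e + 1) % 2 with ho
  clear_value m o
  have hmo : 2 * m + o = e + 1 := by omega
  have hoo : o ≤ 1 := by omega
  have hBpos : 0 < (10:Nat) ^ m := pow_pos (by norm_num) _
  rcases Nat.lt_or_ge n (10 ^ (e + 1)) with hlt | hge
  · -- n has e+1 digits
    have he1 : 1 ≤ e := by
      by_contra hc
      push_neg at hc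
      interval_cases e
      · norm_num at hlt
        omega
    have hm1 : 1 ≤ m := by omega
    have hd : bdigits_go 0 (n : Int) = ((e + 1 : Nat) : Int) := by
      rw [bdigits_char (e + 1) (by omega) n 0 (by rw [show e + 1 - 1 = e from rfl]; omega) hlt]
      ring
    have hk : PySem.Int.floordiv ((e + 1 : Nat) : Int) 2 = ((m : Nat) : Int) := by
      rw [fdiv2_cast, hm]
    have h0 : n / 10 ^ m < 10 ^ (m + o) := by
      rw [Nat.div_lt_iff_lt_mul hBpos]
      calc n < 10 ^ (e + 1) := hlt
      _ = 10 ^ (m + o) * 10 ^ m := by rw [← pow_add]; congr 1; omega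
    have h0lo : 10 ^ (m + o - 1) ≤ n / 10 ^ m := by
      rw [Nat.le_div_iff_mul_le hBpos]
      calc 10 ^ (m + o - 1) * 10 ^ m = 10 ^ e := by rw [← pow_add]; congr 1; omega
      _ ≤ n := le_of_lt h1
    have hh : PySem.Int.floordiv (n : Int) (10 ^ (((m : Nat) : Int)).toNat)
        = ((n / 10 ^ m : Nat) : Int) := by
      rw [Int.toNat_natCast, pow10_cast, fdiv_cast]
    have hmod : PySem.Int.mod ((e + 1 : Nat) : Int) 2 = ((o : Nat) : Int) := by
      rw [mod2_cast, ho]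
    have hmir : mirror ((n / 10 ^ m : Nat) : Int) ((o : Nat) : Int)
        = ((pal m o (n / 10 ^ m) : Nat) : Int) := mirror_char m o _ hm1 hoo h0lo h0
    simp only [hd, hk, hh, hmod, hmir]
    have hpalF : palF m o n = if pal m o (n / 10 ^ m) ≤ n then n / 10 ^ m else n / 10 ^ m - 1 := by
      simp only [palF]
      rw [if_neg (by omega)]
    by_cases hple : pal m o (n / 10 ^ m) ≤ n
    · rw [if_neg (by exact_mod_cast not_lt.mpr hple), hpalF, if_pos hple]
    · push_neg at hple
      rw [if_pos (by exact_mod_cast hple)]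
      -- h0 is strictly above the smallest half, so the decrement keeps the digit count
      have hstrict : 10 ^ (m + o - 1) < n / 10 ^ m := by
        rcases Nat.eq_or_lt_of_le h0lo with heq | hlt2
        · exfalso
          have : pal m o (n / 10 ^ m) = 10 ^ (2 * m + o - 1) + 1 := by
            rw [← heq]
            exact pal_pow m o hm1 hoo
          rw [show 2 * m + o - 1 = e by omega] at this
          omega
        · exact hlt2
      have hp1 : 1 ≤ (10:Nat) ^ (m + o - 1) := Nat.one_le_pow _ _ (by norm_num)
      have hc1 : ((n / 10 ^ m : Nat) : Int) - 1 = ((n / 10 ^ m - 1 : Nat) : Int) := by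
        have : 1 ≤ n / 10 ^ m := by omega
        push_cast [this]
        ring
      have htn : (((e + 1 : Nat) : Int) - ((m : Nat) : Int) - 1).toNat = m + o - 1 := by omega
      rw [hc1, htn]
      rw [if_neg (by
        rw [pow10_cast]
        have : 10 ^ (m + o - 1) ≤ n / 10 ^ m - 1 := by omega
        exact_mod_cast not_lt.mpr this)]
      have hmir2 : mirror ((n / 10 ^ m - 1 : Nat) : Int) ((o : Nat) : Int)
          = ((pal m o (n / 10 ^ m - 1) : Nat) : Int) :=
        mirror_char m o _ hm1 hoo (by omega) (by omega)
      rw [hmir2, hpalF, if_neg (by omega)]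
  · -- n = 10^(e+1), a power of ten: digit-drop case
    have heq : n = 10 ^ (e + 1) := by omega
    set K := (e + 2) / 2 with hK
    set o' := (e + 2) % 2 with ho'
    clear_value K o'
    have hKo : 2 * K + o' = e + 2 := by omega
    have hK1 : 1 ≤ K := by omega
    have hoo' : o' ≤ 1 := by omega
    have hKle : K ≤ e + 1 := by omega
    have hd : bdigits_go 0 (n : Int) = ((e + 2 : Nat) : Int) := by
      rw [bdigits_char (e + 2) (by omega) n 0
        (by rw [show e + 2 - 1 = e + 1 from rfl]; omega)
        (by rw [heq]; exact Nat.pow_lt_pow_right (by norm_num) (by omega))]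
      ring
    have hk : PySem.Int.floordiv ((e + 2 : Nat) : Int) 2 = ((K : Nat) : Int) := by
      rw [fdiv2_cast, hK]
    have hdivpow : n / 10 ^ K = 10 ^ (K + o' - 1) := by
      rw [heq, Nat.pow_div hKle (by norm_num)]
      congr 1
      omega
    have hh : PySem.Int.floordiv (n : Int) (10 ^ (((K : Nat) : Int)).toNat)
        = ((10 ^ (K + o' - 1) : Nat) : Int) := by
      rw [Int.toNat_natCast, pow10_cast, fdiv_cast, hdivpow]
    have hmod : PySem.Int.mod ((e + 2 : Nat) : Int) 2 = ((o' : Nat) : Int) := by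
      rw [mod2_cast, ho']
    have hmir : mirror ((10 ^ (K + o' - 1) : Nat) : Int) ((o' : Nat) : Int)
        = ((pal K o' (10 ^ (K + o' - 1)) : Nat) : Int) :=
      mirror_char K o' _ hK1 hoo' (le_refl _) (Nat.pow_lt_pow_right (by norm_num) (by omega))
    simp only [hd, hk, hh, hmod, hmir]
    have hpp : pal K o' (10 ^ (K + o' - 1)) = 10 ^ (e + 1) + 1 := by
      rw [pal_pow K o' hK1 hoo']
      congr 2
      omega
    rw [if_pos (by rw [hpp]; exact_mod_cast (by omega : (n : Nat) < 10 ^ (e + 1) + 1))]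
    have hc1 : ((10 ^ (K + o' - 1) : Nat) : Int) - 1 = ((10 ^ (K + o' - 1) - 1 : Nat) : Int) := by
      have : 1 ≤ (10:Nat) ^ (K + o' - 1) := Nat.one_le_pow _ _ (by norm_num)
      push_cast [this]
      ring
    have htn : (((e + 2 : Nat) : Int) - ((K : Nat) : Int) - 1).toNat = K + o' - 1 := by omega
    rw [hc1, htn]
    rw [if_pos (by
      rw [pow10_cast]
      have h9 : (10:Nat) ^ (K + o' - 1) - 1 < 10 ^ (K + o' - 1) := by
        have : 1 ≤ (10:Nat) ^ (K + o' - 1) := Nat.one_le_pow _ _ (by norm_num)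
        omega
      exact_mod_cast h9)]
    have htn2 : (((e + 2 : Nat) : Int) - 1).toNat = e + 1 := by omega
    rw [htn2]
    have hRHS : palF m o n = 10 ^ (m + o) - 1 := by
      simp only [palF]
      rw [if_pos]
      rw [heq, Nat.pow_div (by omega) (by norm_num)]
      have : e + 1 - m = m + o := by omega
      rw [this]
    rw [hRHS, show pal m o (10 ^ (m + o) - 1) = 10 ^ (2 * m + o) - 1 from pal_nines m o hoo,
      show 2 * m + o = e + 1 by omega]
    rw [pow10_cast]
    have : 1 ≤ (10:Nat) ^ (e + 1) := Nat.one_le_pow _ _ (by norm_num)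
    push_cast [this]
    ring

-- ---- one whole step of A computes G and subtracts it ----
theorem stepA_eq (ms : Int) (n e : Nat) (h1 : 10 ^ e < n) (h2 : n ≤ 10 ^ (e + 1))
    (hms : (e : Int) < ms) :
    as_pal_step ms (n : Int) = (((G e n : Nat) : Int), ((n - G e n : Nat) : Int)) := by
  unfold as_pal_step
  have hexp := expA ms n e h1 h2 hms
  simp only [hexp]
  have he1 : ((e : Int) + 1) = ((e + 1 : Nat) : Int) := by push_cast; ring
  rw [he1, fdiv2_cast, pyRange_cast]
  have hl : ∀ i ∈ List.range ((e + 1) / 2), i ≤ e := by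
    intro i hi
    have := List.mem_range.mp hi
    omega
  have hinner := innerA e (List.range ((e + 1) / 2)) 0 n hl
  rw [show (((0 : Nat)) : Int) = (0 : Int) by norm_num] at hinner
  rw [hinner]
  set P := GP e (List.range ((e + 1) / 2)) (0, n) with hP
  obtain ⟨hP1, hP2⟩ := GP_sub e (List.range ((e + 1) / 2)) n
  rw [← hP] at hP1 hP2
  rw [mod2_cast]
  by_cases he : e % 2 = 0
  · rw [if_pos (by exact_mod_cast congrArg (fun k : Nat => (k : Int)) he)]
    rw [fdiv2_cast, Int.toNat_natCast, pow10_cast, fdiv_cast]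
    set prm := min 9 (P.2 / 10 ^ (e / 2)) with hprm
    have hprle : prm * 10 ^ (e / 2) ≤ P.2 :=
      le_trans (Nat.mul_le_mul_right _ (min_le_right _ _)) (Nat.div_mul_le_self _ _)
    have hmin : min (9 : Int) ((P.2 / 10 ^ (e / 2) : Nat) : Int)
        = ((prm : Nat) : Int) := by
      rw [hprm]
      push_cast
      ring_nf
    rw [hmin]
    have hG : G e n = P.1 + prm * 10 ^ (e / 2) := by
      rw [G, if_pos he, ← hP, ← hprm]
    rw [Prod.ext_iff]
    constructor
    · show ((P.1 : Nat) : Int) + ((prm : Nat) : Int) * ((10 ^ (e / 2) : Nat) : Int) = _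
      rw [hG]
      push_cast
      ring
    · show ((P.2 : Nat) : Int) - ((prm : Nat) : Int) * ((10 ^ (e / 2) : Nat) : Int) = _
      rw [hG]
      have hre : n - (P.1 + prm * 10 ^ (e / 2)) = P.2 - prm * 10 ^ (e / 2) := by omega
      rw [hre]
      push_cast [hprle]
      ring
  · rw [if_neg (by
      intro hc
      apply he
      exact_mod_cast hc)]
    have hG : G e n = P.1 := by
      rw [G, if_neg he, ← hP]
    rw [Prod.ext_iff]
    constructor
    · show ((P.1 : Nat) : Int) = _
      rw [hG]
    · show ((P.2 : Nat) : Int) = _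
      rw [hG, ← hP2]

-- ---- length of str(n) for n ≥ 0 ----
theorem toDigitsCore_len : ∀ (f n : Nat) (l : List Char), n < 10 ^ (f + 1) →
    (Nat.toDigitsCore 10 (f + 1) n l).length = Nat.log 10 n + 1 + l.length := by
  intro f
  induction f with
  | zero =>
    intro n l hn
    norm_num at hn
    have hd : n / 10 = 0 := Nat.div_eq_of_lt hn
    have hlog : Nat.log 10 n = 0 := Nat.log_eq_zero_iff.mpr (Or.inl hn)
    simp [Nat.toDigitsCore, hd, hlog]
    omega
  | succ f ih =>
    intro n l hn
    rcases Nat.lt_or_ge n 10 with hsm | hbig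
    · have hd : n / 10 = 0 := Nat.div_eq_of_lt hsm
      have hlog : Nat.log 10 n = 0 := Nat.log_eq_zero_iff.mpr (Or.inl hsm)
      simp [Nat.toDigitsCore, hd, hlog]
      omega
    · have hd : n / 10 ≠ 0 := by
        intro hc
        have := Nat.div_eq_of_lt (show n < 10 by omega)
        omega
      have hn' : n / 10 < 10 ^ (f + 1) := by
        rw [Nat.div_lt_iff_lt_mul (by norm_num)]
        calc n < 10 ^ (f + 1 + 1) := hn
        _ = 10 ^ (f + 1) * 10 := pow_succ 10 (f + 1)
      have hrec : Nat.toDigitsCore 10 (f + 1 + 1) n l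
          = Nat.toDigitsCore 10 (f + 1) (n / 10) (Nat.digitChar (n % 10) :: l) := by
        simp [Nat.toDigitsCore, hd]
      rw [hrec, ih (n / 10) _ hn']
      have hlog : Nat.log 10 (n / 10) = Nat.log 10 n - 1 := Nat.log_div_base 10 n
      have hpos : 0 < Nat.log 10 n := Nat.log_pos (by norm_num) hbig
      simp only [List.length_cons]
      omega

-- ---- the two while loops agree ----

theorem G_le (e n : Nat) : G e n ≤ n := by
  obtain ⟨hP1, hP2⟩ := GP_sub e (List.range ((e + 1) / 2)) n
  rw [G]
  split_ifs with he
  · have hprle : min 9 ((GP e (List.range ((e + 1) / 2)) (0, n)).2 / 10 ^ (e / 2)) * 10 ^ (e / 2)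
        ≤ (GP e (List.range ((e + 1) / 2)) (0, n)).2 :=
      le_trans (Nat.mul_le_mul_right _ (min_le_right _ _)) (Nat.div_mul_le_self _ _)
    omega
  · exact hP1

theorem loops_eq (ms : Int) (hms0 : 0 ≤ ms) : ∀ (fuel : Nat) (N : Int) (res : List Int),
    N.toNat ≤ 10 ^ ms.toNat →
    as_pal_loop ms fuel N res = as_pal_alt_loop fuel N res := by
  intro fuel
  induction fuel with
  | zero => intro N res _; rfl
  | succ fuel ih =>
    intro N res hN
    rw [as_pal_loop, as_pal_alt_loop]
    by_cases h0 : N = 0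
    · rw [if_pos h0, if_pos h0]
    · rw [if_neg h0, if_neg h0]
      by_cases hlt : N < 10
      · rw [if_pos hlt, if_pos hlt]
      · rw [if_neg hlt, if_neg hlt]
        push_neg at hlt
        set n := N.toNat with hn
        have hNn : N = (n : Int) := by omega
        have h10 : 10 ≤ n := by omega
        set e := Nat.log 10 (n - 1) with he
        have h1 : 10 ^ e < n := by
          have hx := Nat.pow_log_le_self 10 (show n - 1 ≠ 0 by omega)
          rw [← he] at hx
          omega
        have h2 : n ≤ 10 ^ (e + 1) := by
          have hx := Nat.lt_pow_succ_log_self (show 1 < 10 by norm_num) (n - 1)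
          rw [← he] at hx
          omega
        have hms : (e : Int) < ms := by
          have hlt2 : (10:Nat) ^ e < 10 ^ ms.toNat := by omega
          have := (Nat.pow_lt_pow_iff_right (show 1 < 10 by norm_num)).mp hlt2
          omega
        rw [hNn]
        have hA := stepA_eq ms n e h1 h2 hms
        have hB := stepB_eq n e h10 h1 h2
        have hGle := G_le e n
        have hGeq := G_eq_pal e n h2
        rw [← hGeq] at hB
        show as_pal_loop ms fuel (as_pal_step ms (n : Int)).2
              (res ++ [(as_pal_step ms (n : Int)).1])
            = as_pal_alt_loop fuel ((n : Int) - as_pal_alt_step (n : Int))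
              (res ++ [as_pal_alt_step (n : Int)])
        rw [hA, hB]
        have hsub : (n : Int) - ((G e n : Nat) : Int) = ((n - G e n : Nat) : Int) := by
          push_cast [hGle]
          ring
        rw [hsub]
        exact ih _ _ (by
          have : ((n - G e n : Nat) : Int).toNat = n - G e n := by omega
          rw [this]
          omega)

-- ---- the whole programs agree ----
theorem as_pal_spec : Claim_equal_as_pal := by
  intro N _
  show as_pal N = as_pal_alt N
  unfold as_pal as_pal_alt
  apply loops_eq
  · show (0:Int) ≤ PySem.Str.len (PySem.Int.toStr N)
    rw [PySem.Str.len_eq]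
    positivity
  · rcases le_or_gt N 0 with hneg | hpos
    · have : N.toNat = 0 := by omega
      rw [this]
      positivity
    · set n := N.toNat with hn
      have hn1 : 1 ≤ n := by omega
      have hlen : PySem.Str.len (PySem.Int.toStr N) = ((Nat.log 10 n + 1 : Nat) : Int) := by
        rw [PySem.Str.len_eq, PySem.Int.toList_toStr]
        have hchars : PySem.Int.toChars N = Nat.toDigits 10 n := by
          unfold PySem.Int.toChars
          rw [if_neg (by omega)]
        rw [hchars]
        have hfuel : n < 10 ^ (n + 1) := by
          calc n < 10 ^ n := Nat.lt_pow_self (by norm_num)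
          _ ≤ 10 ^ (n + 1) := Nat.pow_le_pow_right (by norm_num) (by omega)
        have := toDigitsCore_len n n [] hfuel
        unfold Nat.toDigits
        rw [this]
        norm_num
      rw [hlen, Int.toNat_natCast]
      have := Nat.lt_pow_succ_log_self (show 1 < 10 by norm_num) n
      omega
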